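-- pv_equiv track=rewrite | github.com/daniel-reich/ubiquitous-fiesta | baBNZFCozmjNhbp9Q_14.py | box_seq
-- ===== SOURCE A (Python) =====
-- def box_seq(step):
--   score=0
--   for i in range(1,step+1):
--       if i%2!=0:
--           score+=3
--       if i%2==0:
--           score-=1
--   return score
-- ===== SOURCE B (Python) =====
-- def box_seq(step):
--   n = max(step, 0)
--   return 3 * ((n + 1) // 2) - n // 2
-- ===== Notes on version B (the rewrite author's own statement) =====
-- stated objective: faster
-- what changed: Replaced the per-element loop by a closed-form formula: with n = max(step, 0), the result is the odd count times the odd bonus minus the even count, computed from two floor divisions.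
import Mathlib
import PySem

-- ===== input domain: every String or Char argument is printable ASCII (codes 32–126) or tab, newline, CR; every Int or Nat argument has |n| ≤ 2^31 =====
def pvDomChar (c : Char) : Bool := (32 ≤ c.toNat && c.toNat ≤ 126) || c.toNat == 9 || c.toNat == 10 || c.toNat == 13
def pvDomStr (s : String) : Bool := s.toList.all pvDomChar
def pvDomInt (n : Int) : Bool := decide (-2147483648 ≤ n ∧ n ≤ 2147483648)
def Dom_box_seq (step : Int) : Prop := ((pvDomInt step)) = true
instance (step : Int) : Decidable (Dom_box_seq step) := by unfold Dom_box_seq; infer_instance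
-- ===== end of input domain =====

-- B replaces A's O(step) loop by a closed-form count of odds and evens (O(1)).

-- ===== PORT A =====
def box_seq (step : Int) : Int :=
  (PySem.List.pyRange 1 (step + 1) 1).foldl
    (fun score i =>
      let score := if PySem.Int.mod i 2 ≠ 0 then score + 3 else score
      if PySem.Int.mod i 2 = 0 then score - 1 else score)
    0

-- ===== PORT B =====
def box_seq_alt (step : Int) : Int :=
  let n := max step 0
  3 * PySem.Int.floordiv (n + 1) 2 - PySem.Int.floordiv n 2

-- ===== PRECONDITION & SPEC =====
def Spec_box_seq (step : Int) (out : Int) : Prop := out = box_seq_alt step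
instance (step : Int) (out : Int) : Decidable (Spec_box_seq step out) := by unfold Spec_box_seq; infer_instance

-- ===== CLAIM (what is proved, stated in full; the proofs are below) =====
def Claim_equal_box_seq : Prop := ∀ (step : Int), Dom_box_seq step → Spec_box_seq step (box_seq step)

-- ===== LEMMAS AND PROOFS =====

theorem box_seq_alt_closed (step : Int) (h : 0 ≤ step) :
    box_seq_alt step = 3 * ((step + 1) / 2) - step / 2 := by
  unfold box_seq_alt
  simp only [max_eq_left h, PySem.Int.floordiv]
  rw [Int.fdiv_eq_ediv, Int.fdiv_eq_ediv]
  norm_num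

theorem box_seq_eq_of_nonneg (step : Int) (h : 0 ≤ step) :
    box_seq step = box_seq_alt step := by
  induction step, h using Int.le_induction with
  | base =>
    simp [box_seq, box_seq_alt]
  | succ n hn ih =>
    have ih' := ih
    unfold box_seq at ih' ⊢
    rw [PySem.List.pyRange_one_succ_right (by omega : (1:Int) ≤ n + 1), List.foldl_append]
    rw [ih' ]
    rw [box_seq_alt_closed _ hn, box_seq_alt_closed _ (by omega)]
    simp only [List.foldl_cons, List.foldl_nil, PySem.Int.mod]
    have hm : (n + 1).fmod 2 = (n + 1) % 2 := by
      rw [Int.fmod_eq_emod]; norm_num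
    simp only [hm]
    split_ifs <;> omega

-- ===== VERDICT (by name: the statement is the Claim_ definition above) =====
theorem box_seq_spec : Claim_equal_box_seq := by
  intro step _
  unfold Spec_box_seq
  by_cases h : 0 ≤ step
  · exact box_seq_eq_of_nonneg step h
  · replace h : step < 0 := by omega
    simp [box_seq, box_seq_alt, PySem.List.pyRange_one_eq_nil (by omega : step + 1 ≤ 1),
      max_eq_right h.le, PySem.Int.floordiv]
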